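/- GENERATED by farm/mkstatement.py from design/units.tsv (unit `start_decoder.R10e`) and the assertions of Vorbis/Spec/StartDecoderR10.lean — do not edit.
   THE STATEMENT of the proof unit `start_decoder.R10e`: segment R10e of `start_decoder` (12 instructions; entries 0x1162f9;
   exits 0x113b22; ranges 0x1162f9-0x116306 + 0x116323-0x116330 + 0x11633b-0x116348)
   takes each of its entry assertions to one of its exit assertions (`Vorbis.Spec.StartDecoder.SegR10e`), given the contracts of its callees.
   What the names mean: Vorbis/Spec/Basic.lean (the shared hypotheses), Vorbis/Spec/StartDecoderR10.lean (the assertions). The theorem to prove: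
   `theorem start_decoder_R10e_ok : Vorbis.Spec.start_decoder_R10e.Statement`. -/
import Vorbis.Spec.Leaves
import Vorbis.Spec.StartDecoderR10
namespace Vorbis.Spec.start_decoder_R10e
open X86 X86.User Asan

/-- The statement of unit `start_decoder.R10e`. -/
def Statement : Prop :=
  ∀ (Lay : Layout) (_hLay : Lay.hi = 0x1000000) (μ : Microarch) (_hμ : UserX.MicroOK μ) (u₀ : State)
    (_hcode : HasCodeNat Lay u₀ Vorbis.L.start_decoder.entry Vorbis.Code.code_start_decoder.nat Vorbis.L.start_decoder.size)
    (_h_error : ∀ (others : List Obj) (frames : List (Nat × FrameLayout)), Calls Lay μ Vorbis.WayInv (Vorbis.conv u₀) Vorbis.L.error.entry (Vorbis.Spec.error.spec others frames)),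
    Vorbis.Spec.StartDecoder.SegR10e Lay μ u₀

end Vorbis.Spec.start_decoder_R10e
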